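-- pv_equiv track=rewrite | github.com/tta13/book-finder | inverted-index/inverted_index.py | merge_index
-- ===== SOURCE A (Python) =====
-- from typing import Any, Tuple
--
-- def merge_index(term_docs: list[Tuple[str, int]]):
--     result = {}
--     last_term, last_doc = '', 0
--     for term, doc in term_docs:
--         if term not in result:
--             result[term] = [(doc, 1)]
--         elif term == last_term and doc == last_doc:
--             doc, frequency = result[term].pop()
--             frequency += 1
--             result[term].append((doc, frequency))
--         else: # term == last_term and doc != last_doc:
--             result[term].append((doc, 1))
--         last_term = term
--         last_doc = doc
--     return result
-- ===== SOURCE B (Python) =====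
-- def merge_index(term_docs):
--     result = {}
--     i, n = 0, len(term_docs)
--     while i < n:
--         term, doc = term_docs[i]
--         j = i + 1
--         while j < n and term_docs[j] == (term, doc):
--             j += 1
--         if term in result:
--             result[term].append((doc, j - i))
--         else:
--             result[term] = [(doc, j - i)]
--         i = j
--     return result
-- ===== Notes on version B (the rewrite author's own statement) =====
-- stated objective: idiomatic
-- what changed: Replaced A's carried last_term/last_doc state machine with three-way branching and pop/increment/re-append by run-length grouping: scan each maximal run of consecutive identical (term, doc) pairs once, and append a single (doc, run_length) posting.
import Mathlib
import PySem

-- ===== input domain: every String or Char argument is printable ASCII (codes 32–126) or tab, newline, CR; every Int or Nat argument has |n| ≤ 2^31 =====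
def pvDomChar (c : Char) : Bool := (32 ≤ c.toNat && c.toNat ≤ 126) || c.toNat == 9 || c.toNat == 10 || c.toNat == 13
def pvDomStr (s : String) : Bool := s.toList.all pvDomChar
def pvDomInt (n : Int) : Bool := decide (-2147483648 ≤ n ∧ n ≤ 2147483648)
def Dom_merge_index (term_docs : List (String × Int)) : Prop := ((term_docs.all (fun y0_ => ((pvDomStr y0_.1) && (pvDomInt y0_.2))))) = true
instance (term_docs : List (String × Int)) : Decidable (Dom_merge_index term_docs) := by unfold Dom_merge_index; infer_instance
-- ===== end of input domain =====

-- B replaces A's last_term/last_doc state machine (with its pop/increment/re-append) by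
-- run-length grouping of consecutive identical (term, doc) pairs: same values, more idiomatic.


-- ===== PORT A =====
-- one loop iteration of A: state = (result, last_term, last_doc)
def mergeStepA (st : PySem.Dict String (List (Int × Int)) × String × Int) (td : String × Int) :
    PySem.Dict String (List (Int × Int)) × String × Int :=
  let result := st.1
  let last_term := st.2.1
  let last_doc := st.2.2
  let term := td.1
  let doc := td.2
  if result.contains term = false then
    (result.insert term [(doc, 1)], term, doc)
  else if term == last_term && doc == last_doc then
    -- doc, frequency = result[term].pop(); frequency += 1; result[term].append((doc, frequency))
    match (result.getD term []).getLast? with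
    | some df =>
        (result.modify term [] (fun l => l.dropLast ++ [(df.1, df.2 + 1)]), term, df.1)
    | none => (result, term, doc)   -- .pop() on an empty list would be IndexError; unreachable (entries are always nonempty)
  else
    (result.modify term [] (fun l => l ++ [(doc, 1)]), term, doc)

def merge_index (term_docs : List (String × Int)) : List (String × List (Int × Int)) :=
  ((term_docs.foldl mergeStepA (PySem.Dict.empty, "", 0)).1).items

-- ===== PORT B =====
-- Source B's outer while-loop as structural recursion; the inner `while j < n and term_docs[j] == (term, doc)`
-- scan is the takeWhile/dropWhile split, count = j - i = run.length + 1 (exact)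
def mergeRunsB : List (String × Int) → PySem.Dict String (List (Int × Int)) → PySem.Dict String (List (Int × Int))
  | [], result => result
  | (term, doc) :: tail, result =>
      let run := tail.takeWhile (fun p => p == (term, doc))
      let count : Int := (run.length : Int) + 1
      let result' := if result.contains term then
          result.modify term [] (fun l => l ++ [(doc, count)])
        else
          result.insert term [(doc, count)]
      mergeRunsB (tail.dropWhile (fun p => p == (term, doc))) result'
termination_by xs _ => xs.length
decreasing_by
  exact Nat.lt_succ_of_le (List.length_dropWhile_le _ _)

def merge_index_alt (term_docs : List (String × Int)) : List (String × List (Int × Int)) :=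
  (mergeRunsB term_docs PySem.Dict.empty).items

-- ===== PRECONDITION & SPEC =====
def Spec_merge_index (term_docs : List (String × Int)) (out : List (String × List (Int × Int))) : Prop := out = merge_index_alt term_docs
instance (term_docs : List (String × Int)) (out : List (String × List (Int × Int))) : Decidable (Spec_merge_index term_docs out) := by unfold Spec_merge_index; infer_instance

-- ===== CLAIM (what is proved, stated in full; the proofs are below) =====
def Claim_equal_merge_index : Prop := ∀ (term_docs : List (String × Int)), Dom_merge_index term_docs → Spec_merge_index term_docs (merge_index term_docs)

-- ===== LEMMAS AND PROOFS =====

-- A run of m copies of (t, d) hitting the elif branch just bumps the last frequency m times.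
theorem foldl_stepA_replicate (m : Nat) (result : PySem.Dict String (List (Int × Int)))
    (t : String) (d : Int) (l : List (Int × Int)) (c : Int) :
    (List.replicate m (t, d)).foldl mergeStepA (result.insert t (l ++ [(d, c)]), t, d)
      = (result.insert t (l ++ [(d, c + (m : Int))]), t, d) := by
  induction m generalizing c with
  | zero => simp
  | succ k ih =>
      rw [List.replicate_succ, List.foldl_cons]
      have hstep : mergeStepA (result.insert t (l ++ [(d, c)]), t, d) (t, d)
          = (result.insert t (l ++ [(d, c + 1)]), t, d) := by
        simp only [mergeStepA, PySem.Dict.contains_insert_self, PySem.Dict.getD_insert_self,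
          List.getLast?_concat, beq_self_eq_true, Bool.and_self, if_true]
        simp [PySem.Dict.modify, PySem.Dict.getD_insert_self, PySem.Dict.insert_insert_self]
      rw [hstep, ih (c + 1)]
      have : c + 1 + (k:Int) = c + ((k:Nat)+1 : Nat) := by push_cast; ring
      rw [this]


-- main invariant: from a run boundary (the head pair, if it equals the carried (lt, ld),
-- cannot be a key of result) the two loops build the same dictionary
theorem foldl_stepA_eq_mergeRunsB (n : Nat) (xs : List (String × Int))
    (result : PySem.Dict String (List (Int × Int))) (lt : String) (ld : Int)
    (hn : xs.length ≤ n)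
    (h : ∀ p ∈ xs.head?, p = (lt, ld) → result.get? lt = none) :
    (xs.foldl mergeStepA (result, lt, ld)).1 = mergeRunsB xs result := by
  induction n generalizing xs result lt ld with
  | zero =>
      have : xs = [] := List.length_eq_zero_iff.mp (Nat.le_zero.mp hn)
      subst this; simp [mergeRunsB]
  | succ n ih =>
      match xs with
      | [] => simp [mergeRunsB]
      | (t, d) :: tail =>
        set run := tail.takeWhile (fun p => p == (t, d)) with hrundef
        set rest := tail.dropWhile (fun p => p == (t, d)) with hrestdef
        have htail : tail = run ++ rest := (List.takeWhile_append_dropWhile).symm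
        have hrun : run = List.replicate run.length (t, d) := by
          apply List.eq_replicate_of_mem
          intro b hb
          have := List.mem_takeWhile_imp hb
          exact eq_of_beq this
        have hrest_head : ∀ p ∈ rest.head?, (p == (t, d)) = false := by
          intro p hp
          have := List.head?_dropWhile_not (fun p => p == (t, d)) tail
          rw [← hrestdef] at this
          cases hh : rest.head? with
          | none => simp [hh] at hp
          | some q =>
            rw [hh] at hp this
            simp at hp this
            subst hp
            simpa using this
        have hlen : rest.length ≤ n := by
          have h1 := List.length_dropWhile_le (fun p => p == (t, d)) tail
          rw [← hrestdef] at h1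
          simp only [List.length_cons] at hn
          omega
        have hresthyp : ∀ (result' : PySem.Dict String (List (Int × Int))),
            ∀ p ∈ rest.head?, p = (t, d) → result'.get? t = none := by
          intro result' p hp hpe
          have := hrest_head p hp
          rw [hpe] at this
          simp at this
        rw [List.foldl_cons]
        by_cases hc : result.contains t
        · -- term already in result: A takes the else branch (elif impossible at a boundary)
          have hget : ∃ old, result.get? t = some old := by
            rw [PySem.Dict.contains_eq_isSome_get?] at hc
            exact Option.isSome_iff_exists.mp hc
          obtain ⟨old, hold⟩ := hget
          have helif : (t == lt && d == ld) = false := by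
            by_contra hne
            simp only [Bool.and_eq_true, beq_iff_eq, Bool.not_eq_false] at hne
            obtain ⟨h1, h2⟩ := hne
            have := h (t, d) (by simp) (by simp [h1, h2])
            rw [← h1] at this
            rw [this] at hold
            simp at hold
          have hstep : mergeStepA (result, lt, ld) (t, d)
              = (result.insert t (old ++ [(d, 1)]), t, d) := by
            simp only [mergeStepA, hc, helif]
            simp [PySem.Dict.modify, PySem.Dict.getD_eq_get?_getD, hold]
          have hB : mergeRunsB ((t, d) :: tail) result
              = mergeRunsB rest (result.modify t [] (fun l => l ++ [(d, (run.length : Int) + 1)])) := by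
            rw [mergeRunsB]
            simp [← hrundef, ← hrestdef, hc]
          rw [hstep, hB]
          conv_lhs => rw [htail, List.foldl_append, hrun, foldl_stepA_replicate]
          rw [ih rest _ t d hlen (hresthyp _)]
          congr 1
          simp [PySem.Dict.modify, PySem.Dict.getD_eq_get?_getD, hold, add_comm]
        · have hcf : result.contains t = false := by simpa using hc
          have hstep : mergeStepA (result, lt, ld) (t, d)
              = (result.insert t ([] ++ [(d, 1)]), t, d) := by
            simp [mergeStepA, hcf]
          have hB : mergeRunsB ((t, d) :: tail) result
              = mergeRunsB rest (result.insert t [(d, (run.length : Int) + 1)]) := by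
            rw [mergeRunsB]
            simp [← hrundef, ← hrestdef, hcf]
          rw [hstep, hB]
          conv_lhs => rw [htail, List.foldl_append, hrun, foldl_stepA_replicate]
          rw [ih rest _ t d hlen (hresthyp _)]
          congr 1
          simp [add_comm]

-- ===== VERDICT (by name: the statement is the Claim_ definition above) =====
theorem merge_index_spec : Claim_equal_merge_index := by
  intro term_docs _
  unfold Spec_merge_index merge_index merge_index_alt
  rw [foldl_stepA_eq_mergeRunsB term_docs.length term_docs _ _ _ le_rfl]
  intro p _ hp
  simp [PySem.Dict.get?_empty]
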